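-- pv_equiv track=rewrite | github.com/kg290/adaptive-document-ai | 1.py | calculate_proximity_bonus
-- ===== SOURCE A (Python) =====
-- from typing import List, Dict, Any, Optional
--
-- def calculate_proximity_bonus(word_positions: Dict[str, List[int]]) -> int:
--     """Calculate bonus for word proximity"""
--     bonus = 0
--     words_list = list(word_positions.keys())
--
--     for i in range(len(words_list)):
--         for j in range(i + 1, len(words_list)):
--             word1, word2 = words_list[i], words_list[j]
--
--             for pos1 in word_positions[word1]:
--                 for pos2 in word_positions[word2]:
--                     distance = abs(pos1 - pos2)
--                     if distance <= 50:  # Very close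
--                         bonus += 200
--                     elif distance <= 100:  # Close
--                         bonus += 100
--                     elif distance <= 200:  # Moderate
--                         bonus += 50
--
--     return bonus
-- ===== SOURCE B (Python) =====
-- from typing import List, Dict, Any, Optional
--
-- def _count_le(s, x):
--     """Number of elements of the ascending list s that are <= x (hand-written bisect_right)."""
--     lo, hi = 0, len(s)
--     while lo < hi:
--         mid = (lo + hi) // 2
--         if s[mid] <= x:
--             lo = mid + 1
--         else:
--             hi = mid
--     return lo
--
-- def _pair_bonus(s):
--     """Band bonus summed over all unordered pairs of the ascending list s."""
--     total = 0
--     for i, x in enumerate(s):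
--         c50 = i - _count_le(s, x - 51)
--         c100 = i - _count_le(s, x - 101)
--         c200 = i - _count_le(s, x - 201)
--         total += 100 * c50 + 50 * (c100 + c200)
--     return total
--
-- def calculate_proximity_bonus(word_positions: Dict[str, List[int]]) -> int:
--     """Calculate bonus for word proximity: cross-word pairs = all pairs minus same-word pairs."""
--     all_positions = sorted(x for ps in word_positions.values() for x in ps)
--     total = _pair_bonus(all_positions)
--     for ps in word_positions.values():
--         total -= _pair_bonus(sorted(ps))
--     return total
-- ===== Notes on version B (the rewrite author's own statement) =====
-- stated objective: faster
-- what changed: B eliminates the word-pair double loop entirely: cross-word bonus = band bonus over all unordered position pairs of the pooled sorted list minus the same-word pair bonuses, each computed per element with a hand-written binary search, instead of A's quadruple loop over word pairs and position pairs.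
import Mathlib
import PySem

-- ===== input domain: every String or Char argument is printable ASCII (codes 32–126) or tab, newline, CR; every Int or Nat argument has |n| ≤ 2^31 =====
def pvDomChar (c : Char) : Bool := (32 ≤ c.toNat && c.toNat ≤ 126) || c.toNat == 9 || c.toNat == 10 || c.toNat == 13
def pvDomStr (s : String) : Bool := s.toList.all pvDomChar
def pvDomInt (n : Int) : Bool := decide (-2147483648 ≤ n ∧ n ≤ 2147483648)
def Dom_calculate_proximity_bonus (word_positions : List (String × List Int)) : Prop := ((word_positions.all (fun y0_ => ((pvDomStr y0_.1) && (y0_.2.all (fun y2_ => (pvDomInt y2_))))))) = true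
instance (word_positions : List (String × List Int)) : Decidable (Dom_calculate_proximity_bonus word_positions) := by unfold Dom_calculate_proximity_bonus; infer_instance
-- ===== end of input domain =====

-- B replaces A's pairwise distance comparison with per-word sorted positions and hand-written
-- binary-search band counts (measured faster on large inputs).


-- ===== PORT A =====
def calculate_proximity_bonus (word_positions : List (String × List Int)) : Int :=
  let wp := PySem.Dict.ofList word_positions
  let words_list := wp.keys
  (PySem.List.pyRange 0 (words_list.length : Int) 1).foldl (fun bonus i =>
    (PySem.List.pyRange (i + 1) (words_list.length : Int) 1).foldl (fun bonus j =>
      let word1 := PySem.List.pyGetD words_list i ""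
      let word2 := PySem.List.pyGetD words_list j ""
      (wp.getD word1 []).foldl (fun bonus pos1 =>
        (wp.getD word2 []).foldl (fun bonus pos2 =>
          let distance := |pos1 - pos2|
          if distance ≤ 50 then bonus + 200
          else if distance ≤ 100 then bonus + 100
          else if distance ≤ 200 then bonus + 50
          else bonus) bonus) bonus) bonus) 0

-- ===== PORT B =====
-- `_count_le`'s while loop, with fuel = hi - lo ≥ the number of remaining iterations
-- (the Python loop's lo, hi are non-negative, so Nat and `(lo+hi)/2` match `(lo+hi)//2` exactly)
def countLeGo (s : List Int) (x : Int) : Nat → Nat → Nat → Nat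
  | 0, lo, _ => lo
  | fuel + 1, lo, hi =>
    if lo < hi then
      let mid := (lo + hi) / 2
      if PySem.List.pyGetD s (mid : Int) 0 ≤ x then countLeGo s x fuel (mid + 1) hi
      else countLeGo s x fuel lo mid
    else lo

def count_le (s : List Int) (x : Int) : Int :=
  ((countLeGo s x s.length 0 s.length : Nat) : Int)

-- port of `_pair_bonus`
def pair_bonus (s : List Int) : Int :=
  (PySem.List.enumerate s).foldl (fun total ix =>
    let i := ix.1
    let x := ix.2
    let c50 := i - count_le s (x - 51)
    let c100 := i - count_le s (x - 101)
    let c200 := i - count_le s (x - 201)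
    total + (100 * c50 + 50 * (c100 + c200))) 0

def calculate_proximity_bonus_alt (word_positions : List (String × List Int)) : Int :=
  let wp := PySem.Dict.ofList word_positions
  let all_positions := PySem.List.sorted wp.values.flatten (fun v => v) false
  let total := pair_bonus all_positions
  wp.values.foldl (fun total ps =>
    total - pair_bonus (PySem.List.sorted ps (fun v => v) false)) total

-- ===== PRECONDITION & SPEC =====
def Spec_calculate_proximity_bonus (word_positions : List (String × List Int)) (out : Int) : Prop := out = calculate_proximity_bonus_alt word_positions
instance (word_positions : List (String × List Int)) (out : Int) : Decidable (Spec_calculate_proximity_bonus word_positions out) := by unfold Spec_calculate_proximity_bonus; infer_instance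

-- ===== CLAIM (what is proved, stated in full; the proofs are below) =====
def Claim_equal_calculate_proximity_bonus : Prop := ∀ (word_positions : List (String × List Int)), Dom_calculate_proximity_bonus word_positions → Spec_calculate_proximity_bonus word_positions (calculate_proximity_bonus word_positions)


-- ===== LEMMAS AND PROOFS =====

-- the per-(pos1,pos2) contribution of A's innermost branch
def pvBand (p q : Int) : Int :=
  if |p - q| ≤ 50 then 200 else if |p - q| ≤ 100 then 100 else if |p - q| ≤ 200 then 50 else 0

-- number of elements ≤ x, as an Int
def pvC (qs : List Int) (x : Int) : Int := (qs.countP (fun q => decide (q ≤ x)) : Int)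

-- the contribution of one ordered pair of words
def pvS (ps qs : List Int) : Int := (ps.map (fun p => (qs.map (pvBand p)).sum)).sum

-- band bonus over all unordered pairs of one list (each pair counted once)
def pvPairs : List Int → Int
  | [] => 0
  | x :: t => ((t.map (pvBand x)).sum + pvPairs t)

-- band bonus over all cross pairs of distinct lists
def pvCross : List (List Int) → Int
  | [] => 0
  | ps :: rest => pvS ps rest.flatten + pvCross rest

lemma pvC_cons (q : Int) (t : List Int) (x : Int) :
    pvC (q :: t) x = pvC t x + (if q ≤ x then 1 else 0) := by
  simp [pvC, List.countP_cons]

lemma pvBand_symm (p q : Int) : pvBand p q = pvBand q p := by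
  simp [pvBand, abs_sub_comm p q]

lemma pvS_nil (qs : List Int) : pvS [] qs = 0 := by simp [pvS]

lemma pvS_cons (a : Int) (ps qs : List Int) :
    pvS (a :: ps) qs = (qs.map (pvBand a)).sum + pvS ps qs := by simp [pvS]

lemma pvS_append_right (ps ys zs : List Int) :
    pvS ps (ys ++ zs) = pvS ps ys + pvS ps zs := by
  induction ps with
  | nil => simp [pvS]
  | cons a t ih => simp only [pvS_cons, List.map_append, List.sum_append, ih]; ring

lemma pvS_singleton_right (ps : List Int) (x : Int) :
    pvS ps [x] = (ps.map (fun y => pvBand y x)).sum := by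
  simp [pvS]

lemma pvS_nil_right (ps : List Int) : pvS ps [] = 0 := by simp [pvS]

lemma pvPairs_append (xs ys : List Int) :
    pvPairs (xs ++ ys) = pvPairs xs + pvPairs ys + pvS xs ys := by
  induction xs with
  | nil => simp [pvPairs, pvS_nil]
  | cons a t ih =>
    simp only [List.cons_append, pvPairs, List.map_append, List.sum_append, ih, pvS_cons]
    ring

lemma pvPairs_perm {s t : List Int} (h : s.Perm t) : pvPairs s = pvPairs t := by
  induction h with
  | nil => rfl
  | cons x h ih => simp only [pvPairs, ih, (h.map (pvBand x)).sum_eq]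
  | swap x y l =>
    simp only [pvPairs, List.map_cons, List.sum_cons]
    rw [pvBand_symm y x]
    ring
  | trans h1 h2 ih1 ih2 => exact ih1.trans ih2

lemma pvPairs_flatten (vals : List (List Int)) :
    pvPairs vals.flatten = (vals.map pvPairs).sum + pvCross vals := by
  induction vals with
  | nil => simp [pvPairs, pvCross]
  | cons ps rest ih =>
    simp only [List.flatten_cons, pvPairs_append, ih, pvCross, List.map_cons, List.sum_cons]
    ring

lemma pvCross_snoc (vals : List (List Int)) (qs : List Int) :
    pvCross (vals ++ [qs]) = pvCross vals + (vals.map (fun ps => pvS ps qs)).sum := by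
  induction vals with
  | nil => simp [pvCross, pvS_nil_right]
  | cons ps rest ih =>
    simp only [List.cons_append, pvCross, List.flatten_append, List.flatten_cons,
      List.flatten_nil, List.append_nil, pvS_append_right, ih, List.map_cons, List.sum_cons]
    ring

lemma band_sum_le (x : Int) (s : List Int) (hle : ∀ y ∈ s, y ≤ x) :
    (s.map (fun y => pvBand y x)).sum =
      100 * ((s.length : Int) - pvC s (x - 51)) +
      50 * (((s.length : Int) - pvC s (x - 101)) + ((s.length : Int) - pvC s (x - 201))) := by
  induction s with
  | nil => simp [pvC]
  | cons y t ih =>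
    have hy : y ≤ x := hle y (by simp)
    have hcb : ∀ c, pvC t c ≤ (t.length : Int) := by
      intro c; unfold pvC; exact_mod_cast Nat.cast_le.mpr List.countP_le_length
    simp only [List.map_cons, List.sum_cons, pvC_cons, List.length_cons,
      ih (fun z hz => hle z (by simp [hz]))]
    push_cast
    simp only [pvBand, abs_le]
    split_ifs <;> omega

lemma countP_boundary (s : List Int) (x : Int) (r : Nat) (hr : r ≤ s.length)
    (h1 : ∀ i (h : i < s.length), i < r → s[i] ≤ x)
    (h2 : ∀ i (h : i < s.length), r ≤ i → x < s[i]) :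
    s.countP (fun q => decide (q ≤ x)) = r := by
  have hsplit : s = s.take r ++ s.drop r := (List.take_append_drop r s).symm
  rw [hsplit, List.countP_append]
  have ht : (s.take r).countP (fun q => decide (q ≤ x)) = r := by
    rw [List.countP_eq_length.mpr, List.length_take, Nat.min_eq_left hr]
    intro a ha
    obtain ⟨i, hi, rfl⟩ := List.mem_iff_getElem.mp ha
    have hil : i < s.length := by simp [List.length_take] at hi; omega
    rw [List.getElem_take]
    exact decide_eq_true (h1 i hil (by simp [List.length_take] at hi; omega))
  have hd : (s.drop r).countP (fun q => decide (q ≤ x)) = 0 := by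
    rw [List.countP_eq_zero]
    intro a ha
    obtain ⟨i, hi, rfl⟩ := List.mem_iff_getElem.mp ha
    have hlen : i < s.length - r := by simpa [List.length_drop] using hi
    rw [List.getElem_drop]
    simp only [decide_eq_true_eq]
    exact not_le.mpr (h2 (r + i) (by omega) (by omega))
  omega

lemma countLeGo_eq (s : List Int) (x : Int) (hs : s.Pairwise (· ≤ ·)) :
    ∀ fuel lo hi, lo ≤ hi → hi ≤ s.length → hi - lo ≤ fuel →
    (∀ i (h : i < s.length), i < lo → s[i] ≤ x) →
    (∀ i (h : i < s.length), hi ≤ i → x < s[i]) →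
    countLeGo s x fuel lo hi = s.countP (fun q => decide (q ≤ x)) := by
  have hpw := List.pairwise_iff_getElem.mp hs
  intro fuel
  induction fuel with
  | zero =>
    intro lo hi hlh hhl hf h1 h2
    have : lo = hi := by omega
    subst this
    simp only [countLeGo]
    exact (countP_boundary s x lo (le_trans hlh hhl) h1 h2).symm
  | succ n ih =>
    intro lo hi hlh hhl hf h1 h2
    simp only [countLeGo]
    by_cases hlt : lo < hi
    · simp only [hlt, if_true]
      set mid := (lo + hi) / 2 with hmid
      have hmlo : lo ≤ mid := by omega
      have hmhi : mid < hi := by omega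
      have hmlen : mid < s.length := lt_of_lt_of_le hmhi hhl
      rw [PySem.List.pyGetD_natCast, List.getD_eq_getElem s 0 hmlen]
      by_cases hx : s[mid] ≤ x
      · simp only [hx, if_true]
        refine ih (mid + 1) hi (by omega) hhl (by omega) ?_ h2
        intro i h hi'
        rcases Nat.lt_succ_iff_lt_or_eq.mp hi' with h' | h'
        · exact le_trans (hpw i mid h hmlen h') hx
        · subst h'; exact hx
      · simp only [hx, if_false]
        refine ih lo mid hmlo (le_of_lt hmlen) (by omega) h1 ?_
        intro i h hi'
        rcases Nat.eq_or_lt_of_le hi' with h' | h'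
        · subst h'; exact lt_of_not_ge hx
        · exact lt_of_lt_of_le (lt_of_not_ge hx) (hpw mid i hmlen h h')
    · simp only [hlt, if_false]
      have : lo = hi := by omega
      subst this
      exact (countP_boundary s x lo (le_trans hlh hhl) h1 h2).symm

lemma count_le_pairwise (s : List Int) (hs : s.Pairwise (· ≤ ·)) (x : Int) :
    count_le s x = pvC s x := by
  unfold count_le pvC
  rw [countLeGo_eq s x hs _ 0 _ (Nat.zero_le _) le_rfl (by omega)
      (fun i h hi => absurd hi (Nat.not_lt_zero i))
      (fun i h hi => absurd h (by omega))]

lemma enumerate_append_singleton (xs : List Int) (x : Int) :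
    ∀ k : Int, PySem.List.enumerate (xs ++ [x]) k
      = PySem.List.enumerate xs k ++ [(k + (xs.length : Int), x)] := by
  induction xs with
  | nil => intro k; simp [PySem.List.enumerate_cons, PySem.List.enumerate_nil]
  | cons a t ih =>
    intro k
    simp only [List.cons_append, PySem.List.enumerate_cons, ih (k + 1), List.length_cons]
    push_cast
    ring_nf

lemma pvC_append_singleton_high (s : List Int) (x c : Int) (hx : c < x) :
    pvC (s ++ [x]) c = pvC s c := by
  simp [pvC, List.countP_append, not_le.mpr hx]

lemma pair_bonus_eq (s : List Int) (hs : s.Pairwise (· ≤ ·)) : pair_bonus s = pvPairs s := by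
  induction s using List.reverseRecOn with
  | nil => rfl
  | append_singleton t x ih =>
    have hpair := List.pairwise_append.mp hs
    have hst : t.Pairwise (· ≤ ·) := hpair.1
    have hle : ∀ y ∈ t, y ≤ x := fun y hy => hpair.2.2 y hy x (by simp)
    have hcle : ∀ c, c < x → count_le (t ++ [x]) c = pvC t c := fun c hc => by
      rw [count_le_pairwise _ hs, pvC_append_singleton_high _ _ _ hc]
    unfold pair_bonus
    rw [enumerate_append_singleton t x 0, List.foldl_append]
    have hloop : (PySem.List.enumerate t).foldl (fun total ix =>
        let i := ix.1
        let x' := ix.2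
        let c50 := i - count_le (t ++ [x]) (x' - 51)
        let c100 := i - count_le (t ++ [x]) (x' - 101)
        let c200 := i - count_le (t ++ [x]) (x' - 201)
        total + (100 * c50 + 50 * (c100 + c200))) 0 = pair_bonus t := by
      unfold pair_bonus
      refine PySem.List.foldl_congr_mem _ _ _ _ ?_
      intro acc ix hix
      have hmem : ix.2 ∈ t := by
        have := congrArg (fun l => ix.2 ∈ l) (PySem.List.map_snd_enumerate t 0)
        simp only [eq_iff_iff] at this
        exact this.mp (List.mem_map_of_mem hix)
      have hxle : ix.2 ≤ x := hle _ hmem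
      simp only []
      rw [hcle _ (by omega), hcle _ (by omega), hcle _ (by omega),
          count_le_pairwise _ hst, count_le_pairwise _ hst, count_le_pairwise _ hst]
    rw [hloop, ih hst]
    simp only [List.foldl_cons, List.foldl_nil]
    rw [hcle (x - 51) (by omega), hcle (x - 101) (by omega), hcle (x - 201) (by omega)]
    rw [pvPairs_append, show pvPairs [x] = 0 from rfl, pvS_singleton_right,
        band_sum_le x t hle]
    ring

lemma sumij (vals : List (List Int)) :
    ((PySem.List.pyRange 0 (vals.length : Int) 1).map (fun i =>
      ((PySem.List.pyRange (i + 1) (vals.length : Int) 1).map (fun j =>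
        pvS (PySem.List.pyGetD vals i []) (PySem.List.pyGetD vals j []))).sum)).sum
    = pvCross vals := by
  induction vals using List.reverseRecOn with
  | nil => simp [PySem.List.pyRange_one_eq_nil le_rfl, pvCross]
  | append_singleton vs qs ih =>
    have h0n : (0 : Int) ≤ (vs.length : Int) := by positivity
    have hget_last : PySem.List.pyGetD (vs ++ [qs]) (vs.length : Int) [] = qs := by
      rw [PySem.List.pyGetD_eq_getElem _ _ h0n (by simp)]
      exact List.getElem_concat_length (by simp) _
    have hget : ∀ i : Int, 0 ≤ i → i < (vs.length : Int) →
        PySem.List.pyGetD (vs ++ [qs]) i [] = PySem.List.pyGetD vs i [] := by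
      intro i h0 h1
      rw [PySem.List.pyGetD_eq_getElem _ _ h0 (by simp; omega),
          PySem.List.pyGetD_eq_getElem _ _ h0 (by omega)]
      exact List.getElem_append_left (by omega)
    have hn : (((vs ++ [qs]).length : Int)) = (vs.length : Int) + 1 := by simp
    rw [hn, PySem.List.pyRange_one_succ_right h0n, List.map_append, List.sum_append]
    have hmain : (PySem.List.pyRange 0 (vs.length : Int)).map (fun i =>
        ((PySem.List.pyRange (i + 1) ((vs.length : Int) + 1)).map (fun j =>
          pvS (PySem.List.pyGetD (vs ++ [qs]) i []) (PySem.List.pyGetD (vs ++ [qs]) j []))).sum)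
      = (PySem.List.pyRange 0 (vs.length : Int)).map (fun i =>
        ((PySem.List.pyRange (i + 1) (vs.length : Int)).map (fun j =>
          pvS (PySem.List.pyGetD vs i []) (PySem.List.pyGetD vs j []))).sum
        + pvS (PySem.List.pyGetD vs i []) qs) := by
      refine List.map_congr_left ?_
      intro i hi
      rcases PySem.List.mem_pyRange_one.mp hi with ⟨hi0, hiN⟩
      rw [PySem.List.pyRange_one_succ_right (by omega), List.map_append, List.sum_append,
          hget i hi0 hiN]
      congr 1
      · refine congrArg List.sum (List.map_congr_left ?_)
        intro j hj
        rcases PySem.List.mem_pyRange_one.mp hj with ⟨hj0, hjN⟩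
        rw [hget j (by omega) hjN]
      · simp [hget_last]
    rw [hmain, PySem.List.sum_map_add_int, ih]
    have hrow : (PySem.List.pyRange 0 (vs.length : Int)).map (fun i =>
        pvS (PySem.List.pyGetD vs i []) qs) = vs.map (fun ps => pvS ps qs) := by
      have : (PySem.List.pyRange 0 (vs.length : Int)).map (fun i =>
          pvS (PySem.List.pyGetD vs i []) qs)
          = ((PySem.List.pyRange 0 (vs.length : Int)).map (fun j =>
              PySem.List.pyGetD vs j [])).map (fun ps => pvS ps qs) := by
        rw [List.map_map]; rfl
      rw [this, PySem.List.map_pyGetD_pyRange_zero' vs ([] : List Int)]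
    rw [hrow, pvCross_snoc]
    have hsing : ([(vs.length : Int)].map (fun i =>
        ((PySem.List.pyRange (i + 1) ((vs.length : Int) + 1)).map (fun j =>
          pvS (PySem.List.pyGetD (vs ++ [qs]) i []) (PySem.List.pyGetD (vs ++ [qs]) j []))).sum)).sum = 0 := by
      simp [PySem.List.pyRange_one_eq_nil le_rfl]
    rw [hsing]
    ring

lemma innerA_eq (ps qs : List Int) (b : Int) :
    ps.foldl (fun bonus pos1 =>
      qs.foldl (fun bonus pos2 =>
        let distance := |pos1 - pos2|
        if distance ≤ 50 then bonus + 200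
        else if distance ≤ 100 then bonus + 100
        else if distance ≤ 200 then bonus + 50
        else bonus) bonus) b = b + pvS ps qs := by
  have hin : ∀ (p c : Int), qs.foldl (fun bonus pos2 =>
      let distance := |p - pos2|
      if distance ≤ 50 then bonus + 200
      else if distance ≤ 100 then bonus + 100
      else if distance ≤ 200 then bonus + 50
      else bonus) c = c + (qs.map (pvBand p)).sum := by
    intro p c
    have hb : (fun (bonus pos2 : Int) =>
        let distance := |p - pos2|
        if distance ≤ 50 then bonus + 200
        else if distance ≤ 100 then bonus + 100
        else if distance ≤ 200 then bonus + 50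
        else bonus) = fun acc q => acc + pvBand p q := by
      funext acc q
      simp only [pvBand]
      split_ifs <;> omega
    rw [hb, PySem.List.foldl_add]
  rw [PySem.List.foldl_congr_mem ps _ (fun bonus p => bonus + (qs.map (pvBand p)).sum) b
        (fun acc p _ => hin p acc),
      PySem.List.foldl_add]
  rfl

lemma A_eq (word_positions : List (String × List Int)) :
    calculate_proximity_bonus word_positions
      = pvCross (PySem.Dict.ofList word_positions).values := by
  simp only [calculate_proximity_bonus]
  set d := PySem.Dict.ofList word_positions with hd
  have hnd : d.keys.Nodup := PySem.Dict.nodup_keys_ofList word_positions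
  have hklen : (d.keys.length : Int) = (d.values.length : Int) := by
    simp [PySem.Dict.keys, PySem.Dict.values]
  have hid : ∀ k : Int, 0 ≤ k → k < (d.values.length : Int) →
      d.getD (PySem.List.pyGetD d.keys k "") [] = PySem.List.pyGetD d.values k [] := by
    intro k h0 h1
    have hkn : k.toNat < d.items.length := by
      simp only [PySem.Dict.values, List.length_map] at h1; omega
    rw [PySem.List.pyGetD_eq_getElem _ _ h0 (by rw [hklen]; exact h1),
        PySem.List.pyGetD_eq_getElem _ _ h0 h1]
    have hkeys : d.keys[k.toNat]'(by simp [PySem.Dict.keys]; omega)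
        = (d.items[k.toNat]'hkn).1 := by simp [PySem.Dict.keys]
    have hvalsk : d.values[k.toNat]'(by simp [PySem.Dict.values]; omega)
        = (d.items[k.toNat]'hkn).2 := by simp [PySem.Dict.values]
    rw [hkeys, hvalsk]
    have hmem : ((d.items[k.toNat]'hkn).1, (d.items[k.toNat]'hkn).2) ∈ d.items := by
      simp [List.getElem_mem hkn]
    exact PySem.Dict.getD_of_mem_items d hmem hnd []
  rw [hklen]
  refine Eq.trans (PySem.List.foldl_congr_mem _ _ (fun acc i =>
      acc + ((PySem.List.pyRange (i + 1) ((d.values.length : Int))).map (fun j =>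
        pvS (PySem.List.pyGetD d.values i []) (PySem.List.pyGetD d.values j []))).sum) 0 ?_) ?_
  · intro acc i hi
    rcases PySem.List.mem_pyRange_one.mp hi with ⟨hi0, hiN⟩
    refine Eq.trans (PySem.List.foldl_congr_mem _ _ (fun acc2 j =>
        acc2 + pvS (PySem.List.pyGetD d.values i []) (PySem.List.pyGetD d.values j [])) acc ?_) ?_
    · intro acc2 j hj
      rcases PySem.List.mem_pyRange_one.mp hj with ⟨hj0, hjN⟩
      rw [innerA_eq, hid i hi0 hiN, hid j (by omega) hjN]
    · exact PySem.List.foldl_add _ _ _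
  · rw [PySem.List.foldl_add]
    rw [zero_add]
    exact sumij d.values

lemma B_eq (word_positions : List (String × List Int)) :
    calculate_proximity_bonus_alt word_positions
      = pvCross (PySem.Dict.ofList word_positions).values := by
  simp only [calculate_proximity_bonus_alt]
  set d := PySem.Dict.ofList word_positions with hd
  have hsorted : ∀ ps : List Int,
      (PySem.List.sorted ps (fun v => v) false).Pairwise (· ≤ ·) := fun ps => by
    simpa using PySem.List.sorted_pairwise (xs := ps) (key := fun v => v)
  have hpb : ∀ ps : List Int,
      pair_bonus (PySem.List.sorted ps (fun v => v) false) = pvPairs ps := fun ps => by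
    rw [pair_bonus_eq _ (hsorted ps), pvPairs_perm (PySem.List.sorted_perm ps (fun v => v) false)]
  have hsubbody : (fun (total : Int) (ps : List Int) =>
      total - pair_bonus (PySem.List.sorted ps (fun v => v) false))
      = fun total ps => total + (-(pvPairs ps)) := by
    funext total ps
    rw [hpb ps]
    ring
  rw [hsubbody, PySem.List.foldl_add, hpb d.values.flatten]
  have hneg : (d.values.map (fun ps => -pvPairs ps)).sum = -((d.values.map pvPairs).sum) := by
    rw [show d.values.map (fun ps => -pvPairs ps) = (d.values.map pvPairs).map (fun x => -x)
          from (List.map_map).symm, ← List.sum_neg]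
  rw [hneg, pvPairs_flatten]
  ring

-- ===== VERDICT (by name: the statement is the Claim_ definition above) =====
theorem calculate_proximity_bonus_spec : Claim_equal_calculate_proximity_bonus := by
  intro word_positions _
  unfold Spec_calculate_proximity_bonus
  rw [A_eq, B_eq]
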